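-- pv_equiv track=rewrite | github.com/sinakhodadad92/Ocustus | SOI_Server-develop/soi_server/error_detection/image_diff.py | get_error_image_indices
-- ===== SOURCE A (Python) =====
-- from collections import Counter
--
-- def get_error_image_indices(clustering):
--     """
--     Returns all indices of presumably erroneous component images.
--     Assumptions:
--     - The largest cluster contains the correct components (if contains the majority of images)
--     - if there is a tie which cluster is the largest, all indices are returned,
--       i.e. we don't know where the error is, so everything has to be considered manually
--     - some clustering algorithms consider noise, marked as -1, so a valid cluster id is non-negative
--     """
--     if len(clustering) == 0:
--         return []
--
--     # list of pairs where first element is id and second is frequency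
--     cluster_sizes = Counter(clustering).most_common()
--
--     if cluster_sizes[0][0] < 0:  # not a cluster but noise if label < 0
--         # all images are possibly erroneous
--         return list(range(len(clustering)))
--     # tie
--     if len(cluster_sizes) > 1 and cluster_sizes[0][1] == cluster_sizes[1][1]:
--         return list(range(len(clustering)))
--     else:
--         if cluster_sizes[0][1] <= len(clustering) / 2:  # check majority
--             return list(range(len(clustering)))
--         else:
--             # filter for all indices that point to a elements not contained in the largest cluster
--             return [i for i in range(len(clustering)) if clustering[i] != cluster_sizes[0][0]]
-- ===== SOURCE B (Python) =====
-- def get_error_image_indices(clustering):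
--     """Boyer-Moore majority vote instead of building a Counter: A's filter branch
--     fires exactly when one non-negative label holds a strict majority, and in that
--     case the vote's surviving candidate is that label; otherwise all indices."""
--     n = len(clustering)
--     cand, votes = 0, 0
--     for x in clustering:
--         if votes == 0:
--             cand = x
--         votes += 1 if x == cand else -1
--     cnt = clustering.count(cand)
--     if cand >= 0 and 2 * cnt > n:
--         return [i for i in range(n) if clustering[i] != cand]
--     return list(range(n))
-- ===== Notes on version B (the rewrite author's own statement) =====
-- stated objective: alternative
-- what changed: Replaces Counter().most_common() (build a hash frequency table, then sort it) by a Boyer-Moore majority vote over the raw list plus one counting pass: A's filter branch fires exactly when a non-negative label holds a strict majority, and then the vote's surviving candidate is that label; all other branches (tie, noise head, no majority) collapse to range(n).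
import Mathlib
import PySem

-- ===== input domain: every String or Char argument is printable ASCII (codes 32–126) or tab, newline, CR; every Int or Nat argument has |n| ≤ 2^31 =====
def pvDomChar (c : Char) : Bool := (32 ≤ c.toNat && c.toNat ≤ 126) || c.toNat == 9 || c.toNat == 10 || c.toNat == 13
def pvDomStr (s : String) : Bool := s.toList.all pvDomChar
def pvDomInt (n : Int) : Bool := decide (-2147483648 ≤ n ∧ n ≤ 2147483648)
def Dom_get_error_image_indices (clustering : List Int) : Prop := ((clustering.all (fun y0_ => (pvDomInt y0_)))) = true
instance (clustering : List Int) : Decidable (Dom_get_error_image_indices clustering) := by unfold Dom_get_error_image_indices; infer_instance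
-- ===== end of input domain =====

-- B replaces Counter().most_common() by a Boyer-Moore majority vote plus one counting pass (alternative algorithm, same result).

-- ===== PORT A =====
-- Counter(xs).most_common() = sorted(items, key=count, reverse=True), stable: PySem.List.sorted … true.
-- 'cluster_sizes[0][1] <= len(clustering) / 2' uses float '/'; for |n| ≤ 2^31 it is exactly 2*c0 ≤ n.
def get_error_image_indices (clustering : List Int) : List Int :=
  if clustering.length = 0 then []
  else
    let cluster_sizes :=
      PySem.List.sorted (PySem.Dict.counter clustering).items (fun p => p.2) true
    match cluster_sizes with
    | [] => []  -- unreachable: clustering ≠ []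
    | (l0, c0) :: rest =>
      if l0 < 0 then PySem.List.pyRange 0 (clustering.length : Int) 1
      else if (match rest with | (_, c1) :: _ => c0 == c1 | [] => false) then
        PySem.List.pyRange 0 (clustering.length : Int) 1
      else if 2 * c0 ≤ (clustering.length : Int) then
        PySem.List.pyRange 0 (clustering.length : Int) 1
      else
        (PySem.List.pyRange 0 (clustering.length : Int) 1).filter
          (fun i => PySem.List.pyGetD clustering i 0 != l0)

-- ===== PORT B =====
-- the body of B's for-loop: 'if votes == 0: cand = x; votes += 1 if x == cand else -1'
def pvStep (s : Int × Int) (x : Int) : Int × Int :=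
  let cand := if s.2 = 0 then x else s.1
  (cand, s.2 + (if x = cand then 1 else -1))

def get_error_image_indices_alt (clustering : List Int) : List Int :=
  let n : Int := clustering.length
  let st := clustering.foldl pvStep (0, 0)
  let cand := st.1
  let cnt : Int := PySem.List.count clustering cand
  if 0 ≤ cand ∧ 2 * cnt > n then
    (PySem.List.pyRange 0 n 1).filter (fun i => PySem.List.pyGetD clustering i 0 != cand)
  else
    PySem.List.pyRange 0 n 1

-- ===== PRECONDITION & SPEC =====
def Spec_get_error_image_indices (clustering : List Int) (out : List Int) : Prop := out = get_error_image_indices_alt clustering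
instance (clustering : List Int) (out : List Int) : Decidable (Spec_get_error_image_indices clustering out) := by unfold Spec_get_error_image_indices; infer_instance

-- ===== CLAIM (what is proved, stated in full; the proofs are below) =====
def Claim_equal_get_error_image_indices : Prop := ∀ (clustering : List Int), Dom_get_error_image_indices clustering → Spec_get_error_image_indices clustering (get_error_image_indices clustering)

-- ===== LEMMAS AND PROOFS =====

-- Boyer–Moore invariant: votes stay non-negative, and every value's count is bounded
-- through the surviving candidate/vote pair (the start state (c,v) acts as v virtual copies of c).
theorem pv_bm (l : List Int) (c v : Int) (hv : 0 ≤ v) :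
    0 ≤ (l.foldl pvStep (c, v)).2 ∧
    ∀ m : Int, 2 * (l.count m : Int) ≤ l.length
      + (if m = (l.foldl pvStep (c, v)).1 then (l.foldl pvStep (c, v)).2 else -(l.foldl pvStep (c, v)).2)
      + (if m = c then -v else v) := by
  induction l generalizing c v with
  | nil =>
    refine ⟨hv, ?_⟩
    intro m
    simp only [List.count_nil, List.foldl_nil, List.length_nil]
    split_ifs <;> omega
  | cons x t ih =>
    by_cases h0 : v = 0
    · have hstep : pvStep (c, v) x = (x, 1) := by simp [pvStep, h0]
      have := ih x 1 (by omega)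
      rw [List.foldl_cons, hstep]
      refine ⟨this.1, ?_⟩
      intro m
      have hm := this.2 m
      have hc : ((x :: t).count m : Int) = (t.count m : Int) + (if m = x then 1 else 0) := by
        rcases eq_or_ne m x with h | h
        · simp [h, List.count_cons_self]
        · simp [List.count_cons_of_ne (Ne.symm h), h]
      rw [hc]
      simp only [List.length_cons]
      push_cast
      split_ifs at hm ⊢ <;> omega
    · by_cases hxc : x = c
      · have hstep : pvStep (c, v) x = (c, v + 1) := by simp [pvStep, h0, hxc]
        have := ih c (v + 1) (by omega)
        rw [List.foldl_cons, hstep]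
        refine ⟨this.1, ?_⟩
        intro m
        have hm := this.2 m
        have hc : ((x :: t).count m : Int) = (t.count m : Int) + (if m = x then 1 else 0) := by
          rcases eq_or_ne m x with h | h
          · simp [h, List.count_cons_self]
          · simp [List.count_cons_of_ne (Ne.symm h), h]
        rw [hc]
        simp only [List.length_cons]
        push_cast
        subst hxc
        split_ifs at hm ⊢ <;> omega
      · have hstep : pvStep (c, v) x = (c, v + -1) := by simp [pvStep, h0, hxc]
        have := ih c (v + -1) (by omega)
        rw [List.foldl_cons, hstep]
        refine ⟨this.1, ?_⟩
        intro m
        have hm := this.2 m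
        have hc : ((x :: t).count m : Int) = (t.count m : Int) + (if m = x then 1 else 0) := by
          rcases eq_or_ne m x with h | h
          · simp [h, List.count_cons_self]
          · simp [List.count_cons_of_ne (Ne.symm h), h]
        rw [hc]
        simp only [List.length_cons]
        push_cast
        split_ifs at hm ⊢ <;> omega

-- any value other than the vote's survivor has no strict majority
theorem pv_bm_final (l : List Int) (m : Int) (hm : m ≠ (l.foldl pvStep (0, 0)).1) :
    2 * (l.count m : Int) ≤ l.length := by
  obtain ⟨hv, h⟩ := pv_bm l 0 0 le_rfl
  have hm2 := h m
  rw [if_neg hm] at hm2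
  split_ifs at hm2 <;> omega

theorem pv_main (clustering : List Int) :
    get_error_image_indices clustering = get_error_image_indices_alt clustering := by
  rcases eq_or_ne clustering [] with hnil | hne
  · subst hnil; rfl
  have hlen : ¬ (clustering.length = 0) := by simpa using hne
  -- the items of the Counter
  have hLitems := PySem.Dict.items_counter clustering
  have hLne : (PySem.Dict.counter clustering).items ≠ [] := by
    rw [hLitems]
    rcases clustering with _ | ⟨x, xs⟩
    · exact absurd rfl hne
    · have hx : x ∈ PySem.Set.ofList (x :: xs) := by
        rw [PySem.Set.mem_ofList]; exact List.mem_cons_self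
      intro hmapnil
      rcases List.map_eq_nil_iff.mp hmapnil with h
      exact absurd (h ▸ hx) (List.not_mem_nil)
  -- head of most_common()
  obtain ⟨⟨l0, c0⟩, rest, hs⟩ := List.exists_cons_of_ne_nil
      (show PySem.List.sorted (PySem.Dict.counter clustering).items (fun p => p.2) true ≠ [] by
        rw [Ne, PySem.List.sorted_eq_nil_iff]; exact hLne)
  have hperm : (PySem.List.sorted (PySem.Dict.counter clustering).items (fun p => p.2) true).Perm
      (PySem.Dict.counter clustering).items :=
    PySem.List.sorted_perm _ _ _
  have hmem0 : (l0, c0) ∈ (PySem.Dict.counter clustering).items :=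
    hperm.subset (hs ▸ List.mem_cons_self)
  have hc0max : ∀ p ∈ (PySem.Dict.counter clustering).items, p.2 ≤ c0 :=
    PySem.List.key_head_sorted_rev_ge _ _ hs
  -- items are (label, count) pairs
  have hitem_count : ∀ p ∈ (PySem.Dict.counter clustering).items,
      p.2 = (clustering.count p.1 : Int) ∧ p.1 ∈ clustering := by
    intro p hp
    rw [hLitems] at hp
    rcases List.mem_map.mp hp with ⟨k, hk, hkp⟩
    rw [PySem.Set.mem_ofList] at hk
    exact ⟨by rw [← hkp], by rw [← hkp]; exact hk⟩
  have hc0 : c0 = (clustering.count l0 : Int) := (hitem_count (l0, c0) hmem0).1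
  have hl0mem : l0 ∈ clustering := (hitem_count (l0, c0) hmem0).2
  -- c0 is the maximal count of any value
  have hc0max' : ∀ m : Int, (clustering.count m : Int) ≤ c0 := by
    intro m
    by_cases hm : m ∈ clustering
    · have hmem : (m, (clustering.count m : Int)) ∈ (PySem.Dict.counter clustering).items := by
        rw [hLitems]
        have hmS : m ∈ PySem.Set.ofList clustering := by
          rw [PySem.Set.mem_ofList]; exact hm
        exact List.mem_map.mpr ⟨m, hmS, rfl⟩
      exact hc0max _ hmem
    · rw [List.count_eq_zero_of_not_mem hm]
      have : 1 ≤ clustering.count l0 := List.one_le_count_iff.mpr hl0mem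
      push_cast
      omega
  have hcnt : ((PySem.List.count clustering ((clustering.foldl pvStep (0, 0)).1) : Nat) : Int)
      = (List.count ((clustering.foldl pvStep (0, 0)).1) clustering : Int) := by
    rw [PySem.List.count_eq]
  by_cases hB : 0 ≤ (clustering.foldl pvStep (0, 0)).1 ∧
      2 * ((PySem.List.count clustering ((clustering.foldl pvStep (0, 0)).1) : Nat) : Int)
        > (clustering.length : Int)
  · -- B filters: its candidate is a non-negative strict-majority label; A reaches its filter with l0 = cand
    obtain ⟨hge, hmaj⟩ := hB
    have hmaj' : 2 * (List.count ((clustering.foldl pvStep (0, 0)).1) clustering : Int)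
        > (clustering.length : Int) := by rw [← hcnt]; exact hmaj
    have hl0cand : l0 = (clustering.foldl pvStep (0, 0)).1 := by
      by_contra hne0
      have hb := pv_bm_final clustering l0 hne0
      have h2 := hc0max' ((clustering.foldl pvStep (0, 0)).1)
      omega
    subst hl0cand
    have hnl0 : ¬ ((clustering.foldl pvStep (0, 0)).1 < 0) := by omega
    have hnm : ¬ (2 * c0 ≤ (clustering.length : Int)) := by omega
    rcases rest with _ | ⟨⟨l1, c1⟩, r2⟩
    · simp only [get_error_image_indices, get_error_image_indices_alt, if_neg hlen, hs,
        if_neg hnl0]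
      rw [if_neg (by simp), if_neg hnm, if_pos ⟨hge, hmaj⟩]
    · have hmem1 : (l1, c1) ∈ (PySem.Dict.counter clustering).items :=
        hperm.subset (hs ▸ List.mem_cons_of_mem _ List.mem_cons_self)
      have hc1 : c1 = (List.count l1 clustering : Int) := (hitem_count (l1, c1) hmem1).1
      -- the Counter's keys are distinct, so l1 is a different label than the head's
      have hl10 : l1 ≠ (clustering.foldl pvStep (0, 0)).1 := by
        have hmapnodup : ((PySem.Dict.counter clustering).items.map Prod.fst).Nodup := by
          rw [hLitems, List.map_map]
          have hid : (Prod.fst ∘ fun k => (k, (List.count k clustering : Int))) = id := rfl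
          rw [hid, List.map_id]
          exact PySem.Set.nodup_ofList clustering
        have hnd := (hperm.map Prod.fst).nodup_iff.mpr hmapnodup
        rw [hs] at hnd
        simp only [List.map_cons, List.nodup_cons, List.mem_cons] at hnd
        intro h
        exact hnd.1 (Or.inl h.symm)
      have hb := pv_bm_final clustering l1 hl10
      have htie : (c0 == c1) = false := by
        have : c0 ≠ c1 := by omega
        simpa using this
      simp only [get_error_image_indices, get_error_image_indices_alt, if_neg hlen, hs,
        if_neg hnl0, htie]
      rw [if_neg (by simp), if_neg hnm, if_pos ⟨hge, hmaj⟩]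
  · -- B returns range(n); every branch A can take returns range(n) too
    rcases rest with _ | ⟨⟨l1, c1⟩, r2⟩
    · simp only [get_error_image_indices, get_error_image_indices_alt, if_neg hlen, hs,
        if_neg hB]
      by_cases h1 : l0 < 0
      · rw [if_pos h1]
      · rw [if_neg h1, if_neg (by simp)]
        by_cases h3 : 2 * c0 ≤ (clustering.length : Int)
        · rw [if_pos h3]
        · exfalso
          have hl0cand : l0 = (clustering.foldl pvStep (0, 0)).1 := by
            by_contra hne0
            have hb := pv_bm_final clustering l0 hne0
            omega
          subst hl0cand
          exact hB ⟨by omega, by rw [hcnt]; omega⟩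
    · simp only [get_error_image_indices, get_error_image_indices_alt, if_neg hlen, hs,
        if_neg hB]
      by_cases h1 : l0 < 0
      · rw [if_pos h1]
      · rw [if_neg h1]
        by_cases h2 : (c0 == c1) = true
        · rw [if_pos h2]
        · rw [if_neg h2]
          by_cases h3 : 2 * c0 ≤ (clustering.length : Int)
          · rw [if_pos h3]
          · exfalso
            have hl0cand : l0 = (clustering.foldl pvStep (0, 0)).1 := by
              by_contra hne0
              have hb := pv_bm_final clustering l0 hne0
              omega
            subst hl0cand
            exact hB ⟨by omega, by rw [hcnt]; omega⟩

-- ===== VERDICT (by name: the statement is the Claim_ definition above) =====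
theorem get_error_image_indices_spec : Claim_equal_get_error_image_indices := by
  intro clustering _
  exact pv_main clustering
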